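-- pv_equiv track=rewrite | github.com/GallonShih/hermes | dashboard/backend/scripts/sync_db.py | detect_time_column
-- ===== SOURCE A (Python) =====
-- TABLE_TIME_COLUMNS = {
--     "chat_messages": "published_at",
--     "processed_chat_messages": "published_at",
--     "live_streams": "actual_start_time",
--     "etl_execution_log": "started_at",
--     "word_analysis_log": "created_at",
-- }
--
-- DEFAULT_TIME_COLUMN = "created_at"
--
-- def detect_time_column(table_name: str, columns: list[str]) -> str:
--     """自動偵測時間過濾欄位"""
--     if table_name in TABLE_TIME_COLUMNS:
--         col = TABLE_TIME_COLUMNS[table_name]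
--         if col in columns:
--             return col
--     if DEFAULT_TIME_COLUMN in columns:
--         return DEFAULT_TIME_COLUMN
--     # 最後嘗試常見名稱
--     for candidate in ("updated_at", "published_at", "collected_at", "started_at"):
--         if candidate in columns:
--             return candidate
--     raise ValueError(
--         f"Cannot detect time column for table '{table_name}'. "
--         f"Use --time-column to specify one. Available columns: {columns}"
--     )
-- ===== SOURCE B (Python) =====
-- TABLE_TIME_COLUMNS = {
--     "chat_messages": "published_at",
--     "processed_chat_messages": "published_at",
--     "live_streams": "actual_start_time",
--     "etl_execution_log": "started_at",
--     "word_analysis_log": "created_at",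
-- }
--
-- DEFAULT_TIME_COLUMN = "created_at"
--
-- def detect_time_column(table_name: str, columns: list[str]) -> str:
--     """自動偵測時間過濾欄位"""
--     # priority rank per recognised name (lower = preferred); first occurrence wins
--     rank = {}
--     nxt = 0
--     tbl = TABLE_TIME_COLUMNS.get(table_name)
--     for name in ([tbl] if tbl is not None else []) + [DEFAULT_TIME_COLUMN, "updated_at", "published_at", "collected_at", "started_at"]:
--         if name not in rank:
--             rank[name] = nxt
--         nxt += 1
--     # one pass over the table's columns: keep the lowest-rank recognised column
--     best = None
--     for col in columns:
--         r = rank.get(col)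
--         if r is not None and (best is None or r < best[0]):
--             best = (r, col)
--     if best is None:
--         raise ValueError(
--             f"Cannot detect time column for table '{table_name}'. "
--             f"Use --time-column to specify one. Available columns: {columns}"
--         )
--     return best[1]
-- ===== Notes on version B (the rewrite author's own statement) =====
-- stated objective: alternative
-- what changed: B inverts the traversal: it precomputes a priority-rank dict for the recognised time-column names (table-specific, then default, then four fallbacks) and makes a single pass over columns keeping the lowest-rank match (argmin accumulator), instead of A's cascade of membership tests of each candidate against columns.
import Mathlib
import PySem

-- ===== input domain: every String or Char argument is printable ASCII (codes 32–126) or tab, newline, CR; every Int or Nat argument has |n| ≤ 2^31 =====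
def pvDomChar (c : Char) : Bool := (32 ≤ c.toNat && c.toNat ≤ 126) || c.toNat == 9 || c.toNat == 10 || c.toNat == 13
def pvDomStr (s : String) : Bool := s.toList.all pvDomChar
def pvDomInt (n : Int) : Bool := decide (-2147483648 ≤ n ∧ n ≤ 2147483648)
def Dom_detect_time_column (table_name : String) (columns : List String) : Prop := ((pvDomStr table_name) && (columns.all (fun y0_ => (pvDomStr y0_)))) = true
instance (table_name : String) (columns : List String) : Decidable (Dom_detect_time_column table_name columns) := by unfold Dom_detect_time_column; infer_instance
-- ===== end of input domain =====

-- B replaces A's cascade of candidate-membership tests with a precomputed priority-rank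
-- dict and one argmin pass over columns (objective: alternative decomposition).

-- ===== PORT A =====
-- Module constants shared by both versions (same-module context).
def TABLE_TIME_COLUMNS : PySem.Dict String String :=
  PySem.Dict.ofList [("chat_messages", "published_at"),
   ("processed_chat_messages", "published_at"),
   ("live_streams", "actual_start_time"),
   ("etl_execution_log", "started_at"),
   ("word_analysis_log", "created_at")]

def DEFAULT_TIME_COLUMN : String := "created_at"

-- the `raise ValueError` path is excluded by Pre_; the port returns "" there
def detect_time_column (table_name : String) (columns : List String) : String :=
  match PySem.Dict.get? TABLE_TIME_COLUMNS table_name with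
  | some col =>
      if columns.contains col then col
      else
        if columns.contains DEFAULT_TIME_COLUMN then DEFAULT_TIME_COLUMN
        else
          match (["updated_at", "published_at", "collected_at", "started_at"].find? (fun cand => columns.contains cand)) with
          | some cand => cand
          | none => ""  -- raise ValueError
  | none =>
      if columns.contains DEFAULT_TIME_COLUMN then DEFAULT_TIME_COLUMN
      else
        match (["updated_at", "published_at", "collected_at", "started_at"].find? (fun cand => columns.contains cand)) with
        | some cand => cand
        | none => ""  -- raise ValueError

-- ===== PORT B =====
-- `for name in …: if name not in rank: rank[name] = nxt; nxt += 1`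
def pvBuildRank : List String → PySem.Dict String Int → Int → PySem.Dict String Int
  | [], d, _ => d
  | name :: rest, d, nxt =>
      match PySem.Dict.get? d name with
      | none => pvBuildRank rest (d.insert name nxt) (nxt + 1)
      | some _ => pvBuildRank rest d (nxt + 1)

-- `r = rank.get(col); if r is not None and (best is None or r < best[0]): best = (r, col)`
def pvBestStep (rank : PySem.Dict String Int) (best : Option (Int × String)) (col : String) : Option (Int × String) :=
  match PySem.Dict.get? rank col with
  | some r =>
      match best with
      | none => some (r, col)
      | some (br, bc) => if r < br then some (r, col) else some (br, bc)
  | none => best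

def detect_time_column_alt (table_name : String) (columns : List String) : String :=
  let names :=
    (match PySem.Dict.get? TABLE_TIME_COLUMNS table_name with
     | some tbl => [tbl]
     | none => []) ++
    [DEFAULT_TIME_COLUMN, "updated_at", "published_at", "collected_at", "started_at"]
  let rank := pvBuildRank names PySem.Dict.empty 0
  match columns.foldl (pvBestStep rank) none with
  | some best => best.2
  | none => ""  -- raise ValueError

-- ===== PRECONDITION & SPEC =====
-- Pre_ : exactly the inputs where Python A returns (otherwise it raises ValueError)
def Pre_detect_time_column (table_name : String) (columns : List String) : Prop :=
  (((PySem.Dict.get? TABLE_TIME_COLUMNS table_name).elim false (fun col => columns.contains col))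
   || columns.contains "created_at" || columns.contains "updated_at" || columns.contains "published_at"
   || columns.contains "collected_at" || columns.contains "started_at") = true
instance (table_name : String) (columns : List String) : Decidable (Pre_detect_time_column table_name columns) := by unfold Pre_detect_time_column; infer_instance
def pvWitness_detect_time_column : String × List String := ("chat_messages", ["id", "published_at"])

def Spec_detect_time_column (table_name : String) (columns : List String) (out : String) : Prop := out = detect_time_column_alt table_name columns
instance (table_name : String) (columns : List String) (out : String) : Decidable (Spec_detect_time_column table_name columns out) := by unfold Spec_detect_time_column; infer_instance

-- ===== CLAIM (what is proved, stated in full; the proofs are below) =====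
def Claim_equal_detect_time_column : Prop := ∀ (table_name : String) (columns : List String), Dom_detect_time_column table_name columns → Pre_detect_time_column table_name columns → Spec_detect_time_column table_name columns (detect_time_column table_name columns)

-- ===== LEMMAS AND PROOFS =====

-- rank built by pvBuildRank maps each name to its first index in the name list
lemma pvBuildRank_get? (cs : List String) (d : PySem.Dict String Int) (i : Int) (name : String) :
    PySem.Dict.get? (pvBuildRank cs d i) name =
      match PySem.Dict.get? d name with
      | some v => some v
      | none => (cs.idxOf? name).map (fun j => i + (j : Int)) := by
  induction cs generalizing d i with
  | nil =>
      simp only [pvBuildRank, List.idxOf?_nil]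
      cases d.get? name <;> rfl
  | cons n rest ih =>
      by_cases hn : n = name
      · subst hn
        cases h : d.get? n with
        | none => simp [pvBuildRank, h, ih, PySem.Dict.get?_insert_self, List.idxOf?_cons]
        | some v => simp [pvBuildRank, h, ih]
      · have hbeq : (n == name) = false := by simp [hn]
        cases h : d.get? n with
        | none =>
            rw [pvBuildRank, h, ih, PySem.Dict.get?_insert_of_ne _ _ (Ne.symm hn)]
            cases hg : d.get? name with
            | some v => rfl
            | none =>
                simp only [List.idxOf?_cons, hbeq]
                cases rest.idxOf? name
                · simp
                · simp; omega
        | some v =>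
            rw [pvBuildRank, h, ih]
            cases hg : d.get? name with
            | some w => rfl
            | none =>
                simp only [List.idxOf?_cons, hbeq]
                cases rest.idxOf? name
                · simp
                · simp; omega

-- characterisation of the argmin fold over columns
lemma pvBestFold_spec (rank : PySem.Dict String Int) (columns : List String) :
    ∀ b : Option (Int × String),
      match columns.foldl (pvBestStep rank) b with
      | none => b = none ∧ ∀ c ∈ columns, PySem.Dict.get? rank c = none
      | some (r, c) =>
          (b = some (r, c) ∨ (c ∈ columns ∧ PySem.Dict.get? rank c = some r))
          ∧ (∀ c' ∈ columns, ∀ r', PySem.Dict.get? rank c' = some r' → r ≤ r')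
          ∧ (∀ rb cb, b = some (rb, cb) → r ≤ rb) := by
  induction columns with
  | nil =>
      intro b
      cases b with
      | none => simp
      | some p =>
          obtain ⟨r, c⟩ := p
          simp
  | cons col rest ih =>
      intro b
      have h1 := ih (pvBestStep rank b col)
      simp only [List.foldl_cons]
      cases hm : (rest.foldl (pvBestStep rank) (pvBestStep rank b col)) with
      | none =>
          rw [hm] at h1
          obtain ⟨hb, hall⟩ := h1
          unfold pvBestStep at hb
          constructor
          · cases hg : rank.get? col with
            | none => rw [hg] at hb; exact hb
            | some r =>
                rw [hg] at hb
                cases b with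
                | none => simp at hb
                | some p => obtain ⟨br, bc⟩ := p; dsimp only at hb; split_ifs at hb
          · intro c hc
            rcases List.mem_cons.mp hc with h | h
            · subst h
              cases hg : rank.get? c with
              | none => rfl
              | some r =>
                  exfalso; rw [hg] at hb
                  cases b with
                  | none => simp at hb
                  | some p => obtain ⟨br, bc⟩ := p; dsimp only at hb; split_ifs at hb
            · exact hall c h
      | some p =>
          obtain ⟨r, c⟩ := p
          rw [hm] at h1
          obtain ⟨hsrc, hmin, hacc⟩ := h1
          refine ⟨?_, ?_, ?_⟩
          · -- source: b, col, or rest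
            rcases hsrc with h | h
            · -- came from pvBestStep rank b col
              unfold pvBestStep at h
              cases hg : rank.get? col with
              | none => rw [hg] at h; exact Or.inl h
              | some rc =>
                  rw [hg] at h
                  cases b with
                  | none =>
                      simp at h
                      obtain ⟨h1, h2⟩ := h
                      subst h1; subst h2
                      exact Or.inr ⟨List.mem_cons_self, hg⟩
                  | some p =>
                      obtain ⟨br, bc⟩ := p
                      dsimp only at h
                      split_ifs at h with hlt
                      · simp at h
                        obtain ⟨h1, h2⟩ := h
                        subst h1; subst h2
                        exact Or.inr ⟨List.mem_cons_self, hg⟩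
                      · exact Or.inl h
            · exact Or.inr ⟨List.mem_cons_of_mem _ h.1, h.2⟩
          · -- minimality over col :: rest
            intro c' hc' r' hr'
            rcases List.mem_cons.mp hc' with h | h
            · subst h
              -- r ≤ rank of the head column: pvBestStep picked min(b, head)
              unfold pvBestStep at hacc
              rw [hr'] at hacc
              cases b with
              | none => exact hacc r' c' rfl
              | some p =>
                  obtain ⟨br, bc⟩ := p
                  dsimp only at hacc
                  split_ifs at hacc with hlt
                  · exact hacc r' c' rfl
                  · have h2 := hacc br bc rfl
                    omega
            · exact hmin c' h r' hr'
          · -- accumulator bound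
            intro rb cb hb
            subst hb
            unfold pvBestStep at hacc
            cases hg : rank.get? col with
            | none => rw [hg] at hacc; exact hacc rb cb rfl
            | some rc =>
                rw [hg] at hacc
                dsimp only at hacc
                split_ifs at hacc with hlt
                · have := hacc rc col rfl; omega
                · exact hacc rb cb rfl

-- the argmin pass returns exactly the first name (in priority order) present in columns
lemma pvBest_eq_find (cs columns : List String) :
    (columns.foldl (pvBestStep (pvBuildRank cs PySem.Dict.empty 0)) none).map Prod.snd
      = cs.find? (fun c => columns.contains c) := by
  set rank := pvBuildRank cs PySem.Dict.empty 0 with hrk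
  have hrank : ∀ name, PySem.Dict.get? rank name = (cs.idxOf? name).map (fun j => (j : Int)) := by
    intro name
    rw [hrk, pvBuildRank_get? cs PySem.Dict.empty 0 name, PySem.Dict.get?_empty]
    cases cs.idxOf? name with
    | none => rfl
    | some j => simp
  have hfirst : ∀ name ∈ cs, ∃ j : Nat, cs.idxOf? name = some j ∧ j < cs.length ∧ cs[j]? = some name ∧ ∀ k < j, cs[k]? ≠ some name := by
    intro name hmem
    obtain ⟨j, hj⟩ := Option.isSome_iff_exists.mp (List.isSome_idxOf?.mpr hmem)
    obtain ⟨hlt, heq, hmin⟩ := List.idxOf?_eq_some_iff.mp hj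
    exact ⟨j, hj, hlt, by simp [List.getElem?_eq_getElem hlt, heq],
      fun k hk => by simp [List.getElem?_eq_getElem (Nat.lt_trans hk hlt)]; exact hmin k hk⟩
  have h := pvBestFold_spec rank columns none
  cases hm : columns.foldl (pvBestStep rank) none with
  | none =>
      rw [hm] at h
      obtain ⟨-, hall⟩ := h
      simp only [Option.map_none]
      symm
      rw [List.find?_eq_none]
      intro x hx hpx
      have hxcols : x ∈ columns := by simpa using hpx
      have := hall x hxcols
      rw [hrank x] at this
      obtain ⟨j, hj, -⟩ := hfirst x hx
      simp [hj] at this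
  | some p =>
      obtain ⟨r, c⟩ := p
      rw [hm] at h
      obtain ⟨hsrc, hmin, -⟩ := h
      rcases hsrc with h0 | ⟨hcmem, hcr⟩
      · simp at h0
      simp only [Option.map_some]
      rw [hrank c] at hcr
      obtain ⟨j, hj⟩ : ∃ j : Nat, cs.idxOf? c = some j ∧ r = (j : Int) := by
        cases hj0 : cs.idxOf? c with
        | none => rw [hj0] at hcr; simp at hcr
        | some j => rw [hj0] at hcr; simp at hcr; exact ⟨j, rfl, hcr.symm⟩
      obtain ⟨hj, hrj⟩ := hj
      obtain ⟨hjlt, hjeq, hjmin⟩ := List.idxOf?_eq_some_iff.mp hj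
      symm
      rw [List.find?_eq_some_iff_getElem]
      refine ⟨by simpa using hcmem, j, hjlt, hjeq, ?_⟩
      intro k hk
      simp only [Bool.not_eq_eq_eq_not, Bool.not_true]
      by_contra hcontra
      have hkcols : cs[k] ∈ columns := by
        have : columns.contains cs[k] = true := by
          cases hc : columns.contains cs[k] with
          | true => rfl
          | false => exact absurd hc hcontra
        simpa using this
      have hkcs : cs[k] ∈ cs := List.getElem_mem _
      obtain ⟨j', hj', hj'lt, hj'eq, hj'min⟩ := hfirst cs[k] hkcs
      have hj'le : j' ≤ k := by
        by_contra hgt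
        exact hj'min k (by omega) (by simp [List.getElem?_eq_getElem (by omega : k < cs.length)])
      have hr' : PySem.Dict.get? rank cs[k] = some (j' : Int) := by
        rw [hrank cs[k], hj']; rfl
      have := hmin cs[k] hkcols (j' : Int) hr'
      omega

-- ===== VERDICT (by name: the statement is the Claim_ definition above) =====
theorem detect_time_column_spec : Claim_equal_detect_time_column := by
  intro t cols _ _
  unfold Spec_detect_time_column detect_time_column detect_time_column_alt DEFAULT_TIME_COLUMN
  cases hg : PySem.Dict.get? TABLE_TIME_COLUMNS t with
  | some col =>
      have hkey := pvBest_eq_find ([col] ++ ["created_at", "updated_at", "published_at", "collected_at", "started_at"]) cols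
      simp only [List.cons_append, List.nil_append] at hkey ⊢
      cases hm : cols.foldl (pvBestStep (pvBuildRank [col, "created_at", "updated_at", "published_at", "collected_at", "started_at"] PySem.Dict.empty 0)) none with
      | none =>
          rw [hm] at hkey
          simp only [Option.map_none] at hkey
          have hnone := List.find?_eq_none.mp hkey.symm
          have h1 : col ∉ cols := by simpa using hnone col (by simp)
          have h2 : ("created_at" : String) ∉ cols := by simpa using hnone "created_at" (by simp)
          have h3 : ("updated_at" : String) ∉ cols := by simpa using hnone "updated_at" (by simp)
          have h4 : ("published_at" : String) ∉ cols := by simpa using hnone "published_at" (by simp)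
          have h5 : ("collected_at" : String) ∉ cols := by simpa using hnone "collected_at" (by simp)
          have h6 : ("started_at" : String) ∉ cols := by simpa using hnone "started_at" (by simp)
          simp [h1, h2, h3, h4, h5, h6]
      | some p =>
          obtain ⟨r, c⟩ := p
          rw [hm] at hkey
          simp only [Option.map_some] at hkey
          rw [List.find?_cons] at hkey
          split_ifs with hc1 hc2
          · rw [hc1] at hkey; simp at hkey; simp [hkey]
          · rw [Bool.not_eq_true] at hc1
            rw [hc1, List.find?_cons] at hkey
            rw [hc2] at hkey; simp at hkey; simp [hkey]
          · rw [Bool.not_eq_true] at hc1 hc2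
            rw [hc1, List.find?_cons, hc2] at hkey
            dsimp only at hkey
            rw [← hkey]
  | none =>
      have hkey := pvBest_eq_find (([] : List String) ++ ["created_at", "updated_at", "published_at", "collected_at", "started_at"]) cols
      simp only [List.nil_append] at hkey ⊢
      cases hm : cols.foldl (pvBestStep (pvBuildRank ["created_at", "updated_at", "published_at", "collected_at", "started_at"] PySem.Dict.empty 0)) none with
      | none =>
          rw [hm] at hkey
          simp only [Option.map_none] at hkey
          have hnone := List.find?_eq_none.mp hkey.symm
          have h2 : ("created_at" : String) ∉ cols := by simpa using hnone "created_at" (by simp)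
          have h3 : ("updated_at" : String) ∉ cols := by simpa using hnone "updated_at" (by simp)
          have h4 : ("published_at" : String) ∉ cols := by simpa using hnone "published_at" (by simp)
          have h5 : ("collected_at" : String) ∉ cols := by simpa using hnone "collected_at" (by simp)
          have h6 : ("started_at" : String) ∉ cols := by simpa using hnone "started_at" (by simp)
          simp [h2, h3, h4, h5, h6]
      | some p =>
          obtain ⟨r, c⟩ := p
          rw [hm] at hkey
          simp only [Option.map_some] at hkey
          rw [List.find?_cons] at hkey
          split_ifs with hc2
          · rw [hc2] at hkey; simp at hkey; simp [hkey]
          · rw [Bool.not_eq_true] at hc2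
            rw [hc2] at hkey
            dsimp only at hkey
            rw [← hkey]
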